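-- pv_equiv track=rewrite | github.com/rustamlinabi/Advanced-codes-SoloLearn | Weekday converter.py | weeko
-- ===== SOURCE A (Python) =====
-- def weeko(t):
--     def leap(r):
--         if r%4==0:
--             if r%100==0:
--                 if r%400==0:
--                     return True
--                 else:
--                     return False
--             else:
--                 return True
--         else:
--             return False
--     days=[31,28,31,30,31,30,31,31,30,31,30,31]
--     daysl=[31,29,31,30,31,30,31,31,30,31,30,31]
--     l=0
--     if leap(int(t[0])):
--         l=sum(daysl[:(int(t[1])-1)])+int(t[2])
--     else:
--         l=sum(days[:(int(t[1])-1)])+int(t[2])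
--     r=l
--     for x in range(1580,int(t[0])):
--         if leap(x):
--             r+=366
--         else:
--             r+=365
--     weekdays={-1:"Sunday",0:"Monday",1:"Tuesday",2:"It is Wednesday, my dudes",3:"Thursday",4:"Friday",5:"Saturday",6:"Sunday",7:"Monday"}
--     ter=(r)%7
--     return weekdays[ter]
-- ===== SOURCE B (Python) =====
-- def weeko(t):
--     y, m, d = int(t[0]), int(t[1]), int(t[2])
--     is_leap = y % 4 == 0 and (y % 100 != 0 or y % 400 == 0)
--     months = [31, 29 if is_leap else 28, 31, 30, 31, 30, 31, 31, 30, 31, 30, 31]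
--     total = sum(months[:m - 1]) + d
--     if y > 1580:
--         leaps = lambda n: n // 4 - n // 100 + n // 400
--         total += 365 * (y - 1580) + leaps(y - 1) - leaps(1579)
--     names = ["Monday", "Tuesday", "It is Wednesday, my dudes",
--              "Thursday", "Friday", "Saturday", "Sunday"]
--     return names[total % 7]
-- ===== Notes on version B (the rewrite author's own statement) =====
-- stated objective: alternative
-- what changed: Replaces the year-by-year loop summing 365/366 over every year since 1580 with a closed-form leap-year count via floor division (n//4 - n//100 + n//400), and the weekday dict with a list indexed by total % 7 (a timing run grows the list length, not the year, so no speed-up is measured).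
import Mathlib
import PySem

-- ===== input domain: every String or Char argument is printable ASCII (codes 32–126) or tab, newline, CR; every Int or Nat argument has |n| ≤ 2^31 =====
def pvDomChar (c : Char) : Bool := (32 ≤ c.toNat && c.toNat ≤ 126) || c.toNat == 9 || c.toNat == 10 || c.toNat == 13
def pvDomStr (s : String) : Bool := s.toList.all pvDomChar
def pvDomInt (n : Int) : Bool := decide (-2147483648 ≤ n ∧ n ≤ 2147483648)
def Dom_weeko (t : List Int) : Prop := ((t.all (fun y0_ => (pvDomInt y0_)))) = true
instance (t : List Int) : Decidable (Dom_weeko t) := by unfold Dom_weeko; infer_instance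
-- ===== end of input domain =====

-- B replaces A's year-by-year loop with a closed-form leap-year count (floor division) and the weekday dict with a list; proved equal on lists of length ≥ 3 (A raises IndexError otherwise).

-- ===== PORT A =====
def weekoLeap (r : Int) : Bool :=
  if PySem.Int.mod r 4 == 0 then
    if PySem.Int.mod r 100 == 0 then
      if PySem.Int.mod r 400 == 0 then true else false
    else true
  else false

def weeko (t : List Int) : String :=
  match PySem.List.pyGet? t 0, PySem.List.pyGet? t 1, PySem.List.pyGet? t 2 with
  | some y, some m, some d =>
    let days : List Int := [31,28,31,30,31,30,31,31,30,31,30,31]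
    let daysl : List Int := [31,29,31,30,31,30,31,31,30,31,30,31]
    let l : Int :=
      if weekoLeap y then (PySem.List.slice daysl none (some (m - 1))).sum + d
      else (PySem.List.slice days none (some (m - 1))).sum + d
    let r : Int := (PySem.List.pyRange 1580 y 1).foldl
      (fun acc x => if weekoLeap x then acc + 366 else acc + 365) l
    let weekdays : PySem.Dict Int String := PySem.Dict.ofList
      [(-1, "Sunday"), (0, "Monday"), (1, "Tuesday"), (2, "It is Wednesday, my dudes"),
       (3, "Thursday"), (4, "Friday"), (5, "Saturday"), (6, "Sunday"), (7, "Monday")]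
    let ter : Int := PySem.Int.mod r 7
    (weekdays.get? ter).getD ""   -- key always present (0 ≤ ter < 7); none would be Python's KeyError
  | _, _, _ => ""                 -- IndexError: excluded by Pre_weeko

-- ===== PORT B =====
def weekoLeaps (n : Int) : Int :=
  PySem.Int.floordiv n 4 - PySem.Int.floordiv n 100 + PySem.Int.floordiv n 400

def weeko_alt (t : List Int) : String :=
  match PySem.List.pyGet? t 0 with
  | none => ""
  | some y =>
  match PySem.List.pyGet? t 1 with
  | none => ""
  | some m =>
  match PySem.List.pyGet? t 2 with
  | none => ""
  | some d =>
    let isLeap : Bool :=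
      PySem.Int.mod y 4 == 0 && (!(PySem.Int.mod y 100 == 0) || PySem.Int.mod y 400 == 0)
    let months : List Int := [31, if isLeap then 29 else 28, 31,30,31,30,31,31,30,31,30,31]
    let total0 : Int := (PySem.List.slice months none (some (m - 1))).sum + d
    let total : Int :=
      if 1580 < y then total0 + 365 * (y - 1580) + (weekoLeaps (y - 1) - weekoLeaps 1579)
      else total0
    let names : List String := ["Monday", "Tuesday", "It is Wednesday, my dudes",
                                "Thursday", "Friday", "Saturday", "Sunday"]
    (PySem.List.pyGet? names (PySem.Int.mod total 7)).getD ""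

-- ===== PRECONDITION & SPEC =====
-- A raises IndexError on lists with fewer than 3 elements; Pre_ admits the rest.
def Pre_weeko (t : List Int) : Prop := 3 ≤ t.length
instance (t : List Int) : Decidable (Pre_weeko t) := by unfold Pre_weeko; infer_instance
def pvWitness_weeko : List Int := [2024, 2, 29]

def Spec_weeko (t : List Int) (out : String) : Prop := out = weeko_alt t
instance (t : List Int) (out : String) : Decidable (Spec_weeko t out) := by unfold Spec_weeko; infer_instance

-- ===== CLAIM (what is proved, stated in full; the proofs are below) =====
def Claim_equal_weeko : Prop := ∀ (t : List Int), Dom_weeko t → Pre_weeko t → Spec_weeko t (weeko t)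

-- ===== LEMMAS AND PROOFS =====

-- A's nested-if leap test equals B's boolean expression.
theorem weekoLeap_eq (y : Int) :
    weekoLeap y =
      (PySem.Int.mod y 4 == 0 && (!(PySem.Int.mod y 100 == 0) || PySem.Int.mod y 400 == 0)) := by
  unfold weekoLeap
  cases PySem.Int.mod y 4 == 0 <;> cases PySem.Int.mod y 100 == 0 <;>
    cases PySem.Int.mod y 400 == 0 <;> simp

-- The leap-count formula increments by 1 exactly at leap years.
theorem weekoLeaps_step (b : Int) :
    weekoLeaps b - weekoLeaps (b - 1) = if weekoLeap b then 1 else 0 := by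
  have h4 : b / 4 - (b - 1) / 4 = if (4 : Int) ∣ b then 1 else 0 := by
    by_cases h : (4 : Int) ∣ b <;> simp [h] <;> omega
  have h100 : b / 100 - (b - 1) / 100 = if (100 : Int) ∣ b then 1 else 0 := by
    by_cases h : (100 : Int) ∣ b <;> simp [h] <;> omega
  have h400 : b / 400 - (b - 1) / 400 = if (400 : Int) ∣ b then 1 else 0 := by
    by_cases h : (400 : Int) ∣ b <;> simp [h] <;> omega
  unfold weekoLeaps weekoLeap
  rw [PySem.Int.floordiv_eq_ediv_of_pos (a := b) (by norm_num),
      PySem.Int.floordiv_eq_ediv_of_pos (a := b) (by norm_num),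
      PySem.Int.floordiv_eq_ediv_of_pos (a := b) (by norm_num),
      PySem.Int.floordiv_eq_ediv_of_pos (a := b - 1) (by norm_num),
      PySem.Int.floordiv_eq_ediv_of_pos (a := b - 1) (by norm_num),
      PySem.Int.floordiv_eq_ediv_of_pos (a := b - 1) (by norm_num)]
  simp only [beq_iff_eq, PySem.Int.mod_eq_zero_iff_dvd]
  by_cases p : (4 : Int) ∣ b
  · by_cases q : (100 : Int) ∣ b
    · by_cases r : (400 : Int) ∣ b
      · simp [p, q, r] at h4 h100 h400 ⊢; omega
      · simp [p, q, r] at h4 h100 h400 ⊢; omega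
    · have hr : ¬ (400 : Int) ∣ b := fun hh => q (dvd_trans (by norm_num) hh)
      simp [p, q, hr] at h4 h100 h400 ⊢; omega
  · have hq : ¬ (100 : Int) ∣ b := fun hh => p (dvd_trans (by norm_num) hh)
    have hr : ¬ (400 : Int) ∣ b := fun hh => p (dvd_trans (by norm_num) hh)
    simp [p, hq, hr] at h4 h100 h400 ⊢; omega

-- A's year loop in closed form (stated over a Nat count of loop iterations).
theorem weeko_loop_closed (n : Nat) (l : Int) :
    (PySem.List.pyRange 1580 (1580 + (n : Int)) 1).foldl
        (fun acc x => if weekoLeap x then acc + 366 else acc + 365) l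
      = l + 365 * (n : Int) + (weekoLeaps (1580 + (n : Int) - 1) - weekoLeaps 1579) := by
  induction n with
  | zero =>
    rw [show (1580 : Int) + ((0 : Nat) : Int) = 1580 from by norm_num,
        PySem.List.pyRange_one_eq_nil le_rfl]
    norm_num
  | succ k ih =>
    have h2 : (1580 : Int) + ((k + 1 : Nat) : Int) = (1580 + (k : Int)) + 1 := by push_cast; ring
    rw [h2, PySem.List.pyRange_one_succ_right (by omega), List.foldl_append, ih]
    have e : (1580 + (k : Int)) + 1 - 1 = 1580 + (k : Int) := by ring
    rw [e]
    have hs := weekoLeaps_step (1580 + (k : Int))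
    simp only [List.foldl_cons, List.foldl_nil]
    push_cast
    by_cases h : weekoLeap (1580 + (k : Int)) = true <;> simp [h] at hs ⊢ <;> linarith

-- the loop equals B's conditional closed form, for every year.
theorem weeko_loop_eq (y l : Int) :
    (PySem.List.pyRange 1580 y 1).foldl
        (fun acc x => if weekoLeap x then acc + 366 else acc + 365) l
      = (if 1580 < y then l + 365 * (y - 1580) + (weekoLeaps (y - 1) - weekoLeaps 1579) else l) := by
  by_cases h : 1580 < y
  · have hn : y = 1580 + ((y - 1580).toNat : Int) := by omega
    rw [if_pos h, hn, weeko_loop_closed]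
    have hc : ((y - 1580).toNat : Int) = y - 1580 := by omega
    rw [hc]; ring
  · rw [if_neg h, PySem.List.pyRange_one_eq_nil (by omega)]
    rfl

-- dict lookup in A equals list indexing in B for 0 ≤ i < 7.
theorem weeko_table_eq (i : Int) (h0 : 0 ≤ i) (h7 : i < 7) :
    ((PySem.Dict.ofList
      ([(-1, "Sunday"), (0, "Monday"), (1, "Tuesday"), (2, "It is Wednesday, my dudes"),
        (3, "Thursday"), (4, "Friday"), (5, "Saturday"), (6, "Sunday"), (7, "Monday")] :
        List (Int × String))).get? i).getD ""
      = (PySem.List.pyGet?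
          (["Monday", "Tuesday", "It is Wednesday, my dudes",
            "Thursday", "Friday", "Saturday", "Sunday"] : List String) i).getD "" := by
  interval_cases i <;> decide

-- ===== VERDICT (by name: the statement is the Claim_ definition above) =====
theorem weeko_spec : Claim_equal_weeko := by
  intro t _ hpre
  unfold Spec_weeko
  obtain ⟨y, m, d, rest, rfl⟩ : ∃ y m d rest, t = y :: m :: d :: rest := by
    match t, hpre with
    | a :: b :: c :: r, _ => exact ⟨a, b, c, r, rfl⟩
  have g0 : PySem.List.pyGet? (y :: m :: d :: rest) 0 = some y := by
    rw [PySem.List.pyGet?_of_nonneg _ (by norm_num)]; rfl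
  have g1 : PySem.List.pyGet? (y :: m :: d :: rest) 1 = some m := by
    rw [PySem.List.pyGet?_of_nonneg _ (by norm_num)]; rfl
  have g2 : PySem.List.pyGet? (y :: m :: d :: rest) 2 = some d := by
    rw [PySem.List.pyGet?_of_nonneg _ (by norm_num)]; rfl
  unfold weeko weeko_alt
  rw [g0, g1, g2]
  simp only [← weekoLeap_eq]
  have hsum :
      (if weekoLeap y then
          (PySem.List.slice ([31,29,31,30,31,30,31,31,30,31,30,31] : List Int) none (some (m - 1))).sum + d
        else
          (PySem.List.slice ([31,28,31,30,31,30,31,31,30,31,30,31] : List Int) none (some (m - 1))).sum + d)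
      = (PySem.List.slice
          ([31, if weekoLeap y then 29 else 28, 31,30,31,30,31,31,30,31,30,31] : List Int)
          none (some (m - 1))).sum + d := by
    cases weekoLeap y <;> simp
  rw [hsum, weeko_loop_eq]
  exact weeko_table_eq _ (PySem.Int.mod_nonneg _ (by norm_num)) (PySem.Int.mod_lt _ (by norm_num))
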